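-- pv_equiv track=rewrite | github.com/neonll/mafia-timer-js | scripts/bundle.py | _find_blob_lines
-- ===== SOURCE A (Python) =====
-- def _find_blob_lines(lines):
--     """Locate the manifest + template payload lines by scanning for their
--     wrapper tags, so edits elsewhere in index.html don't bit-rot this script.
--     Returns (manifest_idx, template_idx) as 0-indexed positions."""
--     manifest_idx = template_idx = None
--     for i, line in enumerate(lines):
--         stripped = line.strip()
--         if stripped == '<script type="__bundler/manifest">':
--             manifest_idx = i + 1
--         elif stripped == '<script type="__bundler/template">':
--             template_idx = i + 1
--     if manifest_idx is None or template_idx is None: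
--         raise RuntimeError("could not locate __bundler/manifest or __bundler/template tags")
--     return manifest_idx, template_idx
-- ===== SOURCE B (Python) =====
-- def _find_blob_lines(lines):
--     """Staged re-implementation: strip all lines once, reverse, and use
--     list.index (first hit in the reversed list = last occurrence forward,
--     with early exit), recovering each 1-based position as n - j."""
--     stripped = [line.strip() for line in lines]
--     rev = stripped[::-1]
--     n = len(stripped)
--     try:
--         manifest_idx = n - rev.index('<script type="__bundler/manifest">')
--         template_idx = n - rev.index('<script type="__bundler/template">')
--     except ValueError:
--         raise RuntimeError("could not locate __bundler/manifest or __bundler/template tags")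
--     return manifest_idx, template_idx
-- ===== Notes on version B (the rewrite author's own statement) =====
-- stated objective: alternative
-- what changed: Replaces A's single forward scan with two mutable slots by a staged pipeline: strip all lines, reverse the list, and locate each tag with list.index on the reversed list (first match backward = A's last-write-wins), computing the 1-based position as n - j.
import Mathlib
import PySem

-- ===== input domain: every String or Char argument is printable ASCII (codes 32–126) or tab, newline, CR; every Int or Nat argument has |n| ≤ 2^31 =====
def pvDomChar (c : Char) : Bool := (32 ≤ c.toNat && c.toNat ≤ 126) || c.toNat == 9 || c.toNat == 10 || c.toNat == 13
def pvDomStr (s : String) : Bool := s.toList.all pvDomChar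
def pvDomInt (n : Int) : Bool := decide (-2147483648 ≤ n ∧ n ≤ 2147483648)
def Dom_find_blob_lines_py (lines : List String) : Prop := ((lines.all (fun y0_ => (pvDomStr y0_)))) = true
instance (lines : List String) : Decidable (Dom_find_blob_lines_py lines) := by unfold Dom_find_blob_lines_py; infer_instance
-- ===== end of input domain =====

-- B replaces A's forward scan with two mutable slots by a staged pipeline: strip all lines,
-- reverse, find each tag with list.index on the reversed list (first hit backward = last
-- occurrence forward), position = n - j. Same behaviour; Pre_ excludes the raising inputs.

-- ===== PORT A =====
def find_blob_lines_py (lines : List String) : Int × Int :=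
  let st := (PySem.List.enumerate lines).foldl
    (fun (st : Option Int × Option Int) (p : Int × String) =>
      let stripped := PySem.Str.strip p.2
      if stripped = "<script type=\"__bundler/manifest\">" then (some (p.1 + 1), st.2)
      else if stripped = "<script type=\"__bundler/template\">" then (st.1, some (p.1 + 1))
      else st) (none, none)
  if st.1.isNone || st.2.isNone then (0, 0)  -- Python raises RuntimeError here; excluded by Pre_
  else (st.1.getD 0, st.2.getD 0)

-- ===== PORT B =====
def find_blob_lines_py_alt (lines : List String) : Int × Int :=
  let stripped := lines.map PySem.Str.strip
  let rev := (PySem.List.slice? stripped none none (-1)).getD []  -- stripped[::-1]; step -1 ≠ 0 so never none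
  let n : Int := stripped.length
  match PySem.List.index? rev "<script type=\"__bundler/manifest\">",
        PySem.List.index? rev "<script type=\"__bundler/template\">" with
  | some jm, some jt => (n - jm, n - jt)
  | _, _ => (0, 0)  -- Python's ValueError → RuntimeError here; excluded by Pre_

-- ===== PRECONDITION & SPEC =====
-- A (and B) raise RuntimeError unless both wrapper tags occur as a stripped line.
def Pre_find_blob_lines_py (lines : List String) : Prop :=
  (lines.any (fun l => PySem.Str.strip l = "<script type=\"__bundler/manifest\">")) = true ∧
  (lines.any (fun l => PySem.Str.strip l = "<script type=\"__bundler/template\">")) = true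
instance (lines : List String) : Decidable (Pre_find_blob_lines_py lines) := by
  unfold Pre_find_blob_lines_py; infer_instance
def pvWitness_find_blob_lines_py : List String :=
  ["<script type=\"__bundler/manifest\">", "<script type=\"__bundler/template\">"]

def Spec_find_blob_lines_py (lines : List String) (out : Int × Int) : Prop :=
  out = find_blob_lines_py_alt lines
instance (lines : List String) (out : Int × Int) : Decidable (Spec_find_blob_lines_py lines out) := by
  unfold Spec_find_blob_lines_py; infer_instance

-- ===== CLAIM (what is proved, stated in full; the proofs are below) =====
def Claim_equal_find_blob_lines_py : Prop := ∀ (lines : List String),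
  Dom_find_blob_lines_py lines → Pre_find_blob_lines_py lines →
  Spec_find_blob_lines_py lines (find_blob_lines_py lines)

-- ===== LEMMAS AND PROOFS =====

lemma enumerate_append_singleton (ls : List String) (x : String) (s : Int) :
    PySem.List.enumerate (ls ++ [x]) s
      = PySem.List.enumerate ls s ++ [(s + ls.length, x)] := by
  induction ls generalizing s with
  | nil => simp [PySem.List.enumerate_cons, PySem.List.enumerate_nil]
  | cons a ls ih =>
    simp [PySem.List.enumerate_cons, ih]
    ring_nf

-- Core correspondence: A's two slots after the fold are exactly B's reversed-index? results.
lemma find_blob_core (lines : List String) :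
    ((PySem.List.enumerate lines).foldl
      (fun (st : Option Int × Option Int) (p : Int × String) =>
        if PySem.Str.strip p.2 = "<script type=\"__bundler/manifest\">" then (some (p.1 + 1), st.2)
        else if PySem.Str.strip p.2 = "<script type=\"__bundler/template\">" then (st.1, some (p.1 + 1))
        else st) (none, none)).1
      = Option.map (fun (j : Nat) => (lines.length : Int) - (j : Int))
          (PySem.List.index? ((lines.map PySem.Str.strip).reverse) "<script type=\"__bundler/manifest\">") ∧
    ((PySem.List.enumerate lines).foldl
      (fun (st : Option Int × Option Int) (p : Int × String) =>
        if PySem.Str.strip p.2 = "<script type=\"__bundler/manifest\">" then (some (p.1 + 1), st.2)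
        else if PySem.Str.strip p.2 = "<script type=\"__bundler/template\">" then (st.1, some (p.1 + 1))
        else st) (none, none)).2
      = Option.map (fun (j : Nat) => (lines.length : Int) - (j : Int))
          (PySem.List.index? ((lines.map PySem.Str.strip).reverse) "<script type=\"__bundler/template\">") := by
  induction lines using List.reverseRecOn with
  | nil => simp [PySem.List.enumerate_nil, PySem.List.index?]
  | append_singleton ls x ih =>
    rw [enumerate_append_singleton, List.foldl_append]
    simp only [List.foldl_cons, List.foldl_nil, List.map_append, List.reverse_append,
      List.map_cons, List.map_nil, List.reverse_cons, List.reverse_nil, List.nil_append,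
      List.singleton_append, List.length_append, List.length_singleton]
    have hMT : ("<script type=\"__bundler/template\">" : String) ≠ "<script type=\"__bundler/manifest\">" := by decide
    constructor
    · by_cases h1 : PySem.Str.strip x = "<script type=\"__bundler/manifest\">"
      · rw [h1, PySem.List.index?_cons_self]
        simp
      · rw [PySem.List.index?_cons_of_ne _ h1]
        by_cases h2 : PySem.Str.strip x = "<script type=\"__bundler/template\">" <;>
          · simp [h1, h2, ih.1, Option.map_map]
            congr 1
            funext j
            simp only [Function.comp_apply]
            push_cast
            ring
    · by_cases h2 : PySem.Str.strip x = "<script type=\"__bundler/template\">"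
      · rw [h2, PySem.List.index?_cons_self]
        simp [hMT]
      · rw [PySem.List.index?_cons_of_ne _ h2]
        by_cases h1 : PySem.Str.strip x = "<script type=\"__bundler/manifest\">" <;>
          · simp [h1, h2, ih.2, Option.map_map]
            congr 1
            funext j
            simp only [Function.comp_apply]
            push_cast
            ring

-- ===== VERDICT (by name: the statement is the Claim_ definition above) =====
theorem find_blob_lines_py_spec : Claim_equal_find_blob_lines_py := by
  intro lines _ _
  unfold Spec_find_blob_lines_py find_blob_lines_py find_blob_lines_py_alt
  dsimp only
  rw [PySem.List.slice?_none_none_neg_one]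
  have h := find_blob_core lines
  rw [h.1, h.2]
  simp only [Option.getD_some, List.length_map]
  cases hm : PySem.List.index? ((lines.map PySem.Str.strip).reverse) "<script type=\"__bundler/manifest\">" <;>
    cases ht : PySem.List.index? ((lines.map PySem.Str.strip).reverse) "<script type=\"__bundler/template\">" <;>
      simp
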